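-- pv_equiv track=rewrite | github.com/ngtm165/synprop_kaggle | synprop/graphdataset.py | hybridization_to_spdf
-- ===== SOURCE A (Python) =====
-- def hybridization_to_spdf(hybridization):
--     hybridization = hybridization.lower()
--
--     s = hybridization.count('s')
--     p = hybridization.count('p')
--     d = hybridization.count('d')
--     f = hybridization.count('f')
--
--     p_num = 0
--     d_num = 0
--     f_num = 0
--
--     if 'p' in hybridization:
--         p_index = hybridization.find('p')
--         if p_index + 1 < len(hybridization) and hybridization[p_index + 1].isdigit():
--             num_str = ''
--             for char in hybridization[p_index + 1:]:
--                 if char.isdigit():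
--                     num_str += char
--                 else:
--                     break
--             if num_str:
--                 p_num = int(num_str)
--             else:
--                 p_num = 1
--
--     if 'd' in hybridization:
--         d_index = hybridization.find('d')
--         if d_index + 1 < len(hybridization) and hybridization[d_index + 1].isdigit():
--             num_str = ''
--             for char in hybridization[d_index + 1:]:
--                 if char.isdigit():
--                     num_str += char
--                 else:
--                     break
--             if num_str:
--                 d_num = int(num_str)
--             else:
--                 d_num = 1
--
--     if 'f' in hybridization:
--         f_index = hybridization.find('f')
--         if f_index + 1 < len(hybridization) and hybridization[f_index + 1].isdigit():
--             num_str = ''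
--             for char in hybridization[f_index + 1:]:
--                 if char.isdigit():
--                     num_str += char
--                 else:
--                     break
--             if num_str:
--                 f_num = int(num_str)
--             else:
--                 f_num = 1
--
--     return [s, p_num, d_num, f_num]
-- ===== SOURCE B (Python) =====
-- def _digit_run_value(h, i):
--     """Value of the digit run starting at h[i] (0 if none) and the index just past it."""
--     j = i
--     while j < len(h) and '0' <= h[j] <= '9':
--         j += 1
--     return (int(h[i:j]) if j > i else 0), j
--
--
-- def hybridization_to_spdf(hybridization):
--     h = hybridization.lower()
--     n = len(h)
--     s = 0
--     p = d = f = None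
--     i = 0
--     while i < n:
--         c = h[i]
--         i += 1
--         if c == 's':
--             s += 1
--         elif c == 'p' and p is None:
--             p, i = _digit_run_value(h, i)
--         elif c == 'd' and d is None:
--             d, i = _digit_run_value(h, i)
--         elif c == 'f' and f is None:
--             f, i = _digit_run_value(h, i)
--     return [s, p or 0, d or 0, f or 0]
-- ===== Notes on version B (the rewrite author's own statement) =====
-- stated objective: alternative
-- what changed: A lowercases the string and then makes up to seven separate passes (four .count scans plus, per letter, a membership test, a .find and a slice-copying digit loop); B makes one left-to-right tokenizing scan that tallies the letter s and, at the first occurrence of each of p/d/f, reads off the digit run that follows it in place.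
import Mathlib
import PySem

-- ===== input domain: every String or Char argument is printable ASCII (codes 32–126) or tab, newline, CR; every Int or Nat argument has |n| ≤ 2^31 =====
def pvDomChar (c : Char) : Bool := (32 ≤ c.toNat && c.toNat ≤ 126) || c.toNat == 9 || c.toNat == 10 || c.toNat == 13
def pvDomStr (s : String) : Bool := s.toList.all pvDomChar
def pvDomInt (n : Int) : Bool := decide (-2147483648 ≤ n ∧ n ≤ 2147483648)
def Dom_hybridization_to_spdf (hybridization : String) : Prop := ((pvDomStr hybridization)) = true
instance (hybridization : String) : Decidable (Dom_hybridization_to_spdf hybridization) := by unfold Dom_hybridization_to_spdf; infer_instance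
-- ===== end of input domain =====

-- B replaces A's up-to-seven scans (four counts + three find-and-parse passes) by one
-- left-to-right tokenizing scan of the lowered string (objective: alternative single-pass algorithm).


-- ===== PORT A =====
-- A's (textually triplicated) inner loop: 'for char in tail: if char.isdigit(): num_str += char else: break'
def pvANumLoop : List Char → List Char → List Char
  | [], acc => acc
  | ch :: t, acc =>
    if PySem.Chars.isdigit ch then pvANumLoop t (acc ++ [ch]) else acc

def hybridization_to_spdf (hybridization : String) : List Int :=
  let h := (PySem.Str.lower hybridization).toList
  let s : Int := (PySem.Chars.count h ['s'] : Int)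
  let _p : Int := (PySem.Chars.count h ['p'] : Int)
  let _d : Int := (PySem.Chars.count h ['d'] : Int)
  let _f : Int := (PySem.Chars.count h ['f'] : Int)
  let p_num : Int :=
    if PySem.Chars.isIn ['p'] h then
      let p_index := PySem.Chars.find h ['p']
      if (decide (p_index + 1 < PySem.Chars.len h)
          && PySem.Chars.isdigit ((PySem.Chars.pyGet? h (p_index + 1)).getD ' ')) = true then
        let num_str := pvANumLoop (PySem.Chars.slice h (some (p_index + 1)) none) []
        if num_str ≠ [] then (PySem.Int.ofChars? num_str).getD 0 else 1
      else 0
    else 0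
  let d_num : Int :=
    if PySem.Chars.isIn ['d'] h then
      let d_index := PySem.Chars.find h ['d']
      if (decide (d_index + 1 < PySem.Chars.len h)
          && PySem.Chars.isdigit ((PySem.Chars.pyGet? h (d_index + 1)).getD ' ')) = true then
        let num_str := pvANumLoop (PySem.Chars.slice h (some (d_index + 1)) none) []
        if num_str ≠ [] then (PySem.Int.ofChars? num_str).getD 0 else 1
      else 0
    else 0
  let f_num : Int :=
    if PySem.Chars.isIn ['f'] h then
      let f_index := PySem.Chars.find h ['f']
      if (decide (f_index + 1 < PySem.Chars.len h)
          && PySem.Chars.isdigit ((PySem.Chars.pyGet? h (f_index + 1)).getD ' ')) = true then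
        let num_str := pvANumLoop (PySem.Chars.slice h (some (f_index + 1)) none) []
        if num_str ≠ [] then (PySem.Int.ofChars? num_str).getD 0 else 1
      else 0
    else 0
  [s, p_num, d_num, f_num]

-- ===== PORT B =====
-- B's inner while of `_digit_run_value`: split off the leading digit run (h[i:j], h[j:])
def pvDigitRun : List Char → List Char × List Char
  | [] => ([], [])
  | c :: t =>
    if '0' ≤ c ∧ c ≤ '9' then
      let (run, rest) := pvDigitRun t
      (c :: run, rest)
    else ([], c :: t)

-- `int(h[i:j]) if j > i else 0` of `_digit_run_value`
def pvRunVal (run : List Char) : Int :=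
  if run ≠ [] then (PySem.Int.ofChars? run).getD 0 else 0

theorem pvDigitRun_rest_len (t : List Char) : (pvDigitRun t).2.length ≤ t.length := by
  induction t with
  | nil => simp [pvDigitRun]
  | cons c t ih =>
    simp only [pvDigitRun]
    split
    · simpa using Nat.le_succ_of_le ih
    · simp

-- B's main while loop, on the remaining suffix h[i:]
def pvScan : List Char → Int → Option Int → Option Int → Option Int → List Int
  | [], s, p, d, f => [s, p.getD 0, d.getD 0, f.getD 0]
  | c :: t, s, p, d, f =>
    if c = 's' then pvScan t (s + 1) p d f
    else if c = 'p' ∧ p = none then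
      pvScan (pvDigitRun t).2 s (some (pvRunVal (pvDigitRun t).1)) d f
    else if c = 'd' ∧ d = none then
      pvScan (pvDigitRun t).2 s p (some (pvRunVal (pvDigitRun t).1)) f
    else if c = 'f' ∧ f = none then
      pvScan (pvDigitRun t).2 s p d (some (pvRunVal (pvDigitRun t).1))
    else pvScan t s p d f
  termination_by l => l.length
  decreasing_by
  all_goals simp only [List.length_cons]
  all_goals first
    | exact Nat.lt_succ_of_le (pvDigitRun_rest_len t)
    | omega

def hybridization_to_spdf_alt (hybridization : String) : List Int :=
  let h := (PySem.Str.lower hybridization).toList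
  pvScan h 0 none none none

-- ===== PRECONDITION & SPEC =====
def Spec_hybridization_to_spdf (hybridization : String) (out : List Int) : Prop := out = hybridization_to_spdf_alt hybridization
instance (hybridization : String) (out : List Int) : Decidable (Spec_hybridization_to_spdf hybridization out) := by unfold Spec_hybridization_to_spdf; infer_instance

-- ===== CLAIM (what is proved, stated in full; the proofs are below) =====
def Claim_equal_hybridization_to_spdf : Prop := ∀ (hybridization : String), Dom_hybridization_to_spdf hybridization → Spec_hybridization_to_spdf hybridization (hybridization_to_spdf hybridization)

-- ===== LEMMAS AND PROOFS =====

-- value A/B extract for letter c from the first occurrence of c in l (0 if absent)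
def pvFv : List Char → Char → Int
  | [], _ => 0
  | x :: t, c => if x = c then pvRunVal (t.takeWhile PySem.Chars.isdigit) else pvFv t c

-- A's per-letter block, as one definition (definitionaly what the port computes)
def pvAVal (h : List Char) (c : Char) : Int :=
  if PySem.Chars.isIn [c] h then
    let i := PySem.Chars.find h [c]
    if (decide (i + 1 < PySem.Chars.len h)
        && PySem.Chars.isdigit ((PySem.Chars.pyGet? h (i + 1)).getD ' ')) = true then
      let num_str := pvANumLoop (PySem.Chars.slice h (some (i + 1)) none) []
      if num_str ≠ [] then (PySem.Int.ofChars? num_str).getD 0 else 1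
    else 0
  else 0

theorem pvA_eq (s : String) :
    hybridization_to_spdf s =
      [(PySem.Chars.count (PySem.Str.lower s).toList ['s'] : Int),
       pvAVal (PySem.Str.lower s).toList 'p',
       pvAVal (PySem.Str.lower s).toList 'd',
       pvAVal (PySem.Str.lower s).toList 'f'] := rfl

theorem pvANumLoop_eq (t acc : List Char) :
    pvANumLoop t acc = acc ++ t.takeWhile PySem.Chars.isdigit := by
  induction t generalizing acc with
  | nil => simp [pvANumLoop]
  | cons c t ih =>
    simp only [pvANumLoop, List.takeWhile_cons]
    by_cases h : PySem.Chars.isdigit c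
    · simp [h, ih]
    · simp [h]

theorem pvDigitRun_eq (t : List Char) :
    pvDigitRun t = (t.takeWhile PySem.Chars.isdigit, t.dropWhile PySem.Chars.isdigit) := by
  induction t with
  | nil => simp [pvDigitRun]
  | cons c t ih =>
    simp only [pvDigitRun, List.takeWhile_cons, List.dropWhile_cons, PySem.Chars.isdigit]
    by_cases h : '0' ≤ c ∧ c ≤ '9'
    · simp [h, ih]
    · rw [if_neg h]
      rcases not_and_or.mp h with h1 | h1 <;> simp [h1]

theorem pvFv_not_mem {l : List Char} {c : Char} (h : c ∉ l) : pvFv l c = 0 := by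
  induction l with
  | nil => rfl
  | cons x t ih =>
    simp only [List.mem_cons, not_or] at h
    simp only [pvFv, if_neg (fun (hx : _ = _) => h.1 hx.symm)]
    exact ih h.2

theorem pvFv_append {a : List Char} {c : Char} (t : List Char) (h : c ∉ a) :
    pvFv (a ++ t) c = pvFv t c := by
  induction a with
  | nil => rfl
  | cons x a ih =>
    simp only [List.mem_cons, not_or] at h
    simp only [List.cons_append, pvFv, if_neg (fun (hx : _ = _) => h.1 hx.symm)]
    exact ih h.2

theorem pvFv_digits {run : List Char} {c : Char}
    (hrun : ∀ x ∈ run, PySem.Chars.isdigit x) (hc : ¬ PySem.Chars.isdigit c)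
    (t : List Char) : pvFv (run ++ t) c = pvFv t c := by
  refine pvFv_append t (fun hm => hc ?_)
  exact hrun c hm

theorem pvCount_digits {run : List Char} {c : Char}
    (hrun : ∀ x ∈ run, PySem.Chars.isdigit x) (hc : ¬ PySem.Chars.isdigit c)
    (t : List Char) : (run ++ t).count c = t.count c := by
  rw [List.count_append, List.count_eq_zero_of_not_mem (fun hm => hc (hrun c hm)), Nat.zero_add]

theorem pvNotDigit_s : ¬ PySem.Chars.isdigit 's' := by decide
theorem pvNotDigit_p : ¬ PySem.Chars.isdigit 'p' := by decide
theorem pvNotDigit_d : ¬ PySem.Chars.isdigit 'd' := by decide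
theorem pvNotDigit_f : ¬ PySem.Chars.isdigit 'f' := by decide

theorem pvCount_cons_ne {x c : Char} (h : ¬ x = c) (t : List Char) :
    (x :: t).count c = t.count c := by
  simp [h]

theorem pvFv_cons_ne {x c : Char} (h : ¬ x = c) (t : List Char) :
    pvFv (x :: t) c = pvFv t c := by
  simp [pvFv, h]

-- Chars.count with a single-character needle is List.count
theorem pvCountGo_single (c : Char) (l : List Char) (fuel acc : Nat) (hf : l.length ≤ fuel) :
    PySem.Chars.count.go [c] fuel l acc = acc + l.count c := by
  induction l generalizing fuel acc with
  | nil => cases fuel <;> simp [PySem.Chars.count.go]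
  | cons x t ih =>
    cases fuel with
    | zero => simp at hf
    | succ n =>
      simp only [PySem.Chars.count.go]
      have hlen : t.length ≤ n := by simpa using hf
      by_cases hx : c = x
      · subst hx
        have hpre : ([c].isPrefixOf (c :: t)) = true := by
          simp [List.isPrefixOf]
        rw [if_pos hpre]
        simp only [List.length_cons, List.length_nil, Nat.zero_add, List.drop_succ_cons,
          List.drop_zero]
        rw [ih n (acc + 1) hlen, List.count_cons_self]
        omega
      · have hpre : ([c].isPrefixOf (x :: t)) = false := by
          simp [List.isPrefixOf]
          intro h
          exact absurd h hx
        rw [hpre]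
        simp only [Bool.false_eq_true, if_false]
        rw [pvCount_cons_ne (fun h => hx h.symm)]
        exact ih n acc hlen

theorem pvCount_single (l : List Char) (c : Char) :
    PySem.Chars.count l [c] = l.count c := by
  simp only [PySem.Chars.count, List.isEmpty_cons]
  simpa using pvCountGo_single c l l.length 0 le_rfl

-- A's per-letter block computes pvFv
theorem pvAVal_eq_fv (l : List Char) (c : Char) : pvAVal l c = pvFv l c := by
  by_cases hin : PySem.Chars.isIn [c] l = true
  · -- c occurs in l
    have hfind : PySem.Chars.find l [c] ≠ -1 := by
      simpa [PySem.Chars.isIn] using hin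
    have hnn : 0 ≤ PySem.Chars.find l [c] := by
      have := PySem.Chars.neg_one_le_find (s := l) (sub := [c])
      omega
    obtain ⟨hpre, hmin⟩ := PySem.Chars.find_spec hnn
    set i : Nat := (PySem.Chars.find l [c]).toNat with hi
    have hfi : PySem.Chars.find l [c] = (i : Int) := by
      simp [hi, Int.toNat_of_nonneg hnn]
    obtain ⟨t, ht⟩ : ∃ t, l.drop i = c :: t := by
      rcases hpre with ⟨t, ht⟩
      exact ⟨t, by simpa using ht.symm⟩
    have hilen : i < l.length := by
      by_contra hge
      rw [List.drop_eq_nil_of_le (by omega)] at ht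
      exact List.cons_ne_nil c t ht.symm
    have hsplit : l = l.take i ++ c :: t := by
      conv_lhs => rw [← List.take_append_drop i l, ht]
    have hnotmem : c ∉ l.take i := by
      intro hm
      obtain ⟨j, hj, hget⟩ := List.getElem_of_mem hm
      have hjlen : j < i := by
        simp only [List.length_take] at hj
        omega
      have hjl : j < l.length := by omega
      refine hmin j hjlen ?_
      have hgy : l[j] = c := by simpa [List.getElem_take] using hget
      have hdj : l.drop j = c :: l.drop (j + 1) := by
        rw [List.drop_eq_getElem_cons hjl, hgy]
      rw [hdj]
      exact ⟨l.drop (j + 1), rfl⟩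
    have hfv : pvFv l c = pvRunVal (t.takeWhile PySem.Chars.isdigit) := by
      rw [hsplit, pvFv_append _ hnotmem]
      simp [pvFv]
    rw [hfv]
    simp only [pvAVal, hin, if_true, hfi]
    have hcast : ((i : Int) + 1) = ((i + 1 : Nat) : Int) := by push_cast; ring
    have hslice : PySem.Chars.slice l (some ((i : Int) + 1)) none = t := by
      rw [hcast]
      have := PySem.List.slice_from_natCast (xs := l) (a := i + 1)
      simp only [PySem.Chars.slice_eq_listSlice] at *
      rw [this]
      have : l.drop (i + 1) = (l.drop i).drop 1 := by
        rw [List.drop_drop]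
      rw [this, ht]
      simp
    cases t with
    | nil =>
      have hlen : PySem.Chars.len l = (i : Int) + 1 := by
        have : l.length = i + 1 := by
          have h1 : l.length = (l.take i).length + (c :: ([] : List Char)).length := by
            conv_lhs => rw [hsplit]
            simp
          simpa [List.length_take, Nat.min_eq_left (le_of_lt hilen)] using h1
        simp [PySem.Chars.len, this]
      rw [hlen]
      simp [pvRunVal]
    | cons x t' =>
      have hget : PySem.Chars.pyGet? l ((i : Int) + 1) = some x := by
        rw [hcast]
        simp only [PySem.Chars.pyGet?_eq_listPyGet?]
        rw [PySem.List.pyGet?_natCast]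
        have h1 : l[i+1]? = (l.drop i)[1]? := by
          rw [List.getElem?_drop]
        rw [h1, ht]
        simp
      have hlt : (i : Int) + 1 < PySem.Chars.len l := by
        have h2 : i + 1 < l.length := by
          have h1 : l.length = (l.take i).length + (c :: x :: t').length := by
            conv_lhs => rw [hsplit]
            simp
          simp only [List.length_take, Nat.min_eq_left (le_of_lt hilen), List.length_cons] at h1
          omega
        simp only [PySem.Chars.len]
        exact_mod_cast h2
      rw [hget, hslice]
      by_cases hdig : PySem.Chars.isdigit x
      · have hcond : (decide ((i : Int) + 1 < PySem.Chars.len l)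
            && PySem.Chars.isdigit ((some x).getD ' ')) = true := by
          simp only [PySem.Chars.len] at hlt
          simp [PySem.Chars.len, hlt, hdig]
        rw [if_pos hcond, pvANumLoop_eq]
        simp only [List.nil_append, List.takeWhile_cons, hdig, if_true]
        simp [pvRunVal]
      · have hcond : (decide ((i : Int) + 1 < PySem.Chars.len l)
            && PySem.Chars.isdigit ((some x).getD ' ')) = false := by
          simp [hdig]
        rw [hcond]
        simp [pvRunVal, hdig]
  · -- c does not occur
    have hni : PySem.Chars.isIn [c] l = false := by
      simpa using hin
    have hinf : ¬ [c] <:+: l := (PySem.Chars.isIn_eq_false_iff _ _).mp hni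
    have hcm : c ∉ l := by
      intro hm
      obtain ⟨a, b, rfl⟩ := List.append_of_mem hm
      exact hinf ⟨a, b, by simp⟩
    rw [pvFv_not_mem hcm]
    simp [pvAVal, hin]

-- all elements of a takeWhile-isdigit run are digits
theorem pvRun_digits (t : List Char) :
    ∀ x ∈ t.takeWhile PySem.Chars.isdigit, PySem.Chars.isdigit x :=
  fun _ hx => List.mem_takeWhile_imp hx

-- the invariant of B's single pass
theorem pvScan_inv (l : List Char) (s : Int) (p d f : Option Int) :
    pvScan l s p d f =
      [s + (l.count 's' : Int), p.getD (pvFv l 'p'), d.getD (pvFv l 'd'), f.getD (pvFv l 'f')] := by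
  induction l, s, p, d, f using pvScan.induct with
  | case1 s p d f => simp [pvScan, pvFv]
  | case2 t s p d f ih =>
    have hstep : pvScan ('s' :: t) s p d f = pvScan t (s + 1) p d f := by
      simp [pvScan]
    rw [hstep, ih, List.count_cons_self,
        pvFv_cons_ne (by decide : ¬ 's' = 'p'), pvFv_cons_ne (by decide : ¬ 's' = 'd'),
        pvFv_cons_ne (by decide : ¬ 's' = 'f')]
    have : s + 1 + (t.count 's' : Int) = s + ((t.count 's' + 1 : Nat) : Int) := by
      push_cast
      ring
    rw [this]
  | case3 c t s p d f hc hp ih =>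
    obtain ⟨rfl, rfl⟩ := hp
    have hstep : pvScan ('p' :: t) s none d f =
        pvScan (pvDigitRun t).2 s (some (pvRunVal (pvDigitRun t).1)) d f := by
      simp [pvScan]
    rw [hstep, ih, pvDigitRun_eq]
    have ht : t.takeWhile PySem.Chars.isdigit ++ t.dropWhile PySem.Chars.isdigit = t :=
      List.takeWhile_append_dropWhile
    have hcnt : ('p' :: t).count 's' = (t.dropWhile PySem.Chars.isdigit).count 's' := by
      rw [pvCount_cons_ne (by decide)]
      conv_lhs => rw [← ht]
      exact pvCount_digits (pvRun_digits t) pvNotDigit_s _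
    have hfvp : pvFv ('p' :: t) 'p' = pvRunVal (t.takeWhile PySem.Chars.isdigit) := by
      simp [pvFv]
    have hfvd : pvFv ('p' :: t) 'd' = pvFv (t.dropWhile PySem.Chars.isdigit) 'd' := by
      rw [pvFv_cons_ne (by decide)]
      conv_lhs => rw [← ht]
      exact pvFv_digits (pvRun_digits t) pvNotDigit_d _
    have hfvf : pvFv ('p' :: t) 'f' = pvFv (t.dropWhile PySem.Chars.isdigit) 'f' := by
      rw [pvFv_cons_ne (by decide)]
      conv_lhs => rw [← ht]
      exact pvFv_digits (pvRun_digits t) pvNotDigit_f _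
    rw [hcnt, hfvp, hfvd, hfvf]
    rfl
  | case4 c t s p d f hc hp hd ih =>
    obtain ⟨rfl, rfl⟩ := hd
    have hstep : pvScan ('d' :: t) s p none f =
        pvScan (pvDigitRun t).2 s p (some (pvRunVal (pvDigitRun t).1)) f := by
      simp [pvScan]
    rw [hstep, ih, pvDigitRun_eq]
    have ht : t.takeWhile PySem.Chars.isdigit ++ t.dropWhile PySem.Chars.isdigit = t :=
      List.takeWhile_append_dropWhile
    have hcnt : ('d' :: t).count 's' = (t.dropWhile PySem.Chars.isdigit).count 's' := by
      rw [pvCount_cons_ne (by decide)]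
      conv_lhs => rw [← ht]
      exact pvCount_digits (pvRun_digits t) pvNotDigit_s _
    have hfvp : pvFv ('d' :: t) 'p' = pvFv (t.dropWhile PySem.Chars.isdigit) 'p' := by
      rw [pvFv_cons_ne (by decide)]
      conv_lhs => rw [← ht]
      exact pvFv_digits (pvRun_digits t) pvNotDigit_p _
    have hfvd : pvFv ('d' :: t) 'd' = pvRunVal (t.takeWhile PySem.Chars.isdigit) := by
      simp [pvFv]
    have hfvf : pvFv ('d' :: t) 'f' = pvFv (t.dropWhile PySem.Chars.isdigit) 'f' := by
      rw [pvFv_cons_ne (by decide)]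
      conv_lhs => rw [← ht]
      exact pvFv_digits (pvRun_digits t) pvNotDigit_f _
    rw [hcnt, hfvp, hfvd, hfvf]
    cases p <;> rfl
  | case5 c t s p d f hc hp hd hf ih =>
    obtain ⟨rfl, rfl⟩ := hf
    have hstep : pvScan ('f' :: t) s p d none =
        pvScan (pvDigitRun t).2 s p d (some (pvRunVal (pvDigitRun t).1)) := by
      simp [pvScan]
    rw [hstep, ih, pvDigitRun_eq]
    have ht : t.takeWhile PySem.Chars.isdigit ++ t.dropWhile PySem.Chars.isdigit = t :=
      List.takeWhile_append_dropWhile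
    have hcnt : ('f' :: t).count 's' = (t.dropWhile PySem.Chars.isdigit).count 's' := by
      rw [pvCount_cons_ne (by decide)]
      conv_lhs => rw [← ht]
      exact pvCount_digits (pvRun_digits t) pvNotDigit_s _
    have hfvp : pvFv ('f' :: t) 'p' = pvFv (t.dropWhile PySem.Chars.isdigit) 'p' := by
      rw [pvFv_cons_ne (by decide)]
      conv_lhs => rw [← ht]
      exact pvFv_digits (pvRun_digits t) pvNotDigit_p _
    have hfvd : pvFv ('f' :: t) 'd' = pvFv (t.dropWhile PySem.Chars.isdigit) 'd' := by
      rw [pvFv_cons_ne (by decide)]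
      conv_lhs => rw [← ht]
      exact pvFv_digits (pvRun_digits t) pvNotDigit_d _
    have hfvf : pvFv ('f' :: t) 'f' = pvRunVal (t.takeWhile PySem.Chars.isdigit) := by
      simp [pvFv]
    rw [hcnt, hfvp, hfvd, hfvf]
    cases p <;> cases d <;> rfl
  | case6 c t s p d f hc hp hd hf ih =>
    have hstep : pvScan (c :: t) s p d f = pvScan t s p d f := by
      simp [pvScan, hc, hp, hd, hf]
    rw [hstep, ih, pvCount_cons_ne hc]
    have h2 : p.getD (pvFv (c :: t) 'p') = p.getD (pvFv t 'p') := by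
      cases p with
      | some v => rfl
      | none => rw [pvFv_cons_ne (fun h => hp ⟨h, rfl⟩)]
    have h3 : d.getD (pvFv (c :: t) 'd') = d.getD (pvFv t 'd') := by
      cases d with
      | some v => rfl
      | none => rw [pvFv_cons_ne (fun h => hd ⟨h, rfl⟩)]
    have h4 : f.getD (pvFv (c :: t) 'f') = f.getD (pvFv t 'f') := by
      cases f with
      | some v => rfl
      | none => rw [pvFv_cons_ne (fun h => hf ⟨h, rfl⟩)]
    rw [h2, h3, h4]

-- ===== VERDICT (by name: the statement is the Claim_ definition above) =====
theorem hybridization_to_spdf_spec : Claim_equal_hybridization_to_spdf := by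
  intro s _
  unfold Spec_hybridization_to_spdf
  rw [pvA_eq]
  show _ = hybridization_to_spdf_alt s
  unfold hybridization_to_spdf_alt
  rw [pvScan_inv]
  simp [pvAVal_eq_fv, pvCount_single]
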